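-- pv_equiv track=rewrite | github.com/Ryles1/AdventofCode | 2016/day9.py | decompress2
-- ===== SOURCE A (Python) =====
-- def decompress2(file_str):
--     index = 0
--     decompressed_length = 0
--     while index <= len(file_str):
--         # recursive base case
--         if index == len(file_str):
--             return decompressed_length
--
--         next_char = file_str[index]
--         if next_char != '(':
--             decompressed_length += 1
--             index += 1
--         else:
--             # find the next ')' - assuming the next ")" is within the next 10 characters
--             close_bracket_index = file_str.index(')', index, index + 10)
--             # marker_str is the (AxB) that indicates the number of characters and num of repeats
--             marker_str = ''.join(file_str[index + 1: close_bracket_index])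
--             num_chars, num_repeats = (int(num) for num in marker_str.split('x'))
--             # get the remaining string and send it to be decompressed
--             next_repeat_str = file_str[close_bracket_index + 1: (close_bracket_index + 1 + num_chars)]
--             new_length = decompress2(next_repeat_str)
--             decompressed_length += (new_length * num_repeats)
--             index = close_bracket_index + 1 + num_chars
--     return decompressed_length
-- ===== SOURCE B (Python) =====
-- def decompress2(file_str):
--     # Single linear pass: a stack of (end_index, previous_multiplier) frames replaces
--     # A's recursion on extracted substrings; each literal character adds the current
--     # multiplier product.
--     n = len(file_str)
--     total = 0
--     mult = 1
--     stack = []  # (absolute end of the current repeated region, multiplier to restore)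
--     i = 0
--     while i < n:
--         while stack and stack[-1][0] <= i:
--             _, mult = stack.pop()
--         if file_str[i] == '(':
--             end = stack[-1][0] if stack else n
--             j = file_str.index(')', i, min(i + 10, end))
--             a, b = (int(num) for num in file_str[i + 1:j].split('x'))
--             stack.append((min(j + 1 + a, end), mult))
--             mult *= b
--             i = j + 1
--         else:
--             total += mult
--             i += 1
--     return total
-- ===== Notes on version B (the rewrite author's own statement) =====
-- stated objective: faster
-- what changed: A recursively extracts each marker's repeated substring and re-parses it (re-scanning characters once per nesting level); B makes one left-to-right pass over the original string with a stack of (region-end, multiplier) frames, adding the current multiplier product per literal character.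
-- outside the precondition, e.g. on decompress2('(-3x2)a'): A returns 4, B returns 1
import Mathlib
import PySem

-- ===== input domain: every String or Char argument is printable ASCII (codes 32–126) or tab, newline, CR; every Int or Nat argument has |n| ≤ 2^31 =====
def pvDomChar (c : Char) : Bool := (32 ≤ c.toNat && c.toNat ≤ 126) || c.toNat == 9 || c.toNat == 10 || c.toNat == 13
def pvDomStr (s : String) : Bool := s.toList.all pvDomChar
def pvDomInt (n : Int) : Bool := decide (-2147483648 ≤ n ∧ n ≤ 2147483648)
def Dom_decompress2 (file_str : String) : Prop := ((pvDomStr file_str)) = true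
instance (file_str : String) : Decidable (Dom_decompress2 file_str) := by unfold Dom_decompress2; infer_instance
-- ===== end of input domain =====

-- B replaces A's quadratic recursion-on-extracted-substrings by one linear pass over the
-- string with a stack of (region-end, multiplier) frames; equal on Pre_ (well-formed markers).

-- ===== PORT A =====
-- shared port helper: `file_str.index(')', start, stop)` (ValueError → none).
-- Exact for 0 ≤ start (the only case reachable under Pre_; a negative Python start is clamped differently).
def pyIndexRParen (s : List Char) (start stop : Nat) : Option Nat :=
  (List.range' start (stop - start)).find? (fun j => s.getD j ' ' == ')')

-- shared port helper: the identical line `(int(num) for num in marker_str.split('x'))`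
-- unpacked into two ints, in both Pythons (ValueError → none)
def parseMarker (seg : List Char) : Option (Int × Int) :=
  match PySem.Chars.splitOn seg ['x'] with
  | [u, v] =>
    match PySem.Int.ofChars? u, PySem.Int.ofChars? v with
    | some a, some b => some (a, b)
    | _, _ => none
  | _ => none

-- A's while-loop + self-recursion, fuel-bounded (fuel only makes it total; 2*len+2 is
-- enough on every input satisfying Pre_, proved below); junk value 0 where A raises
def aGo : Nat → List Char → Int → Int → Int
  | 0, _, _, _ => 0
  | fuel+1, s, index, acc =>
    if index > (s.length : Int) then acc            -- while guard fails
    else if index = (s.length : Int) then acc       -- recursive base case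
    else
      match PySem.List.pyGet? s index with
      | none => 0                                   -- IndexError (A raises)
      | some c =>
        if c ≠ '(' then aGo fuel s (index + 1) (acc + 1)
        else
          match pyIndexRParen s index.toNat (min (index.toNat + 10) s.length) with
          | none => 0                               -- ValueError from .index (A raises)
          | some j =>
            match parseMarker (PySem.List.slice s (some (index + 1)) (some (j : Int))) with
            | none => 0                             -- ValueError from int()/unpacking (A raises)
            | some (numChars, numRepeats) =>
              let nextRepeatStr := PySem.List.slice s (some ((j : Int) + 1)) (some ((j : Int) + 1 + numChars))
              let newLength := aGo fuel nextRepeatStr 0 0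
              aGo fuel s ((j : Int) + 1 + numChars) (acc + newLength * numRepeats)

def decompress2 (file_str : String) : Int :=
  aGo (2 * file_str.toList.length + 2) file_str.toList 0 0

-- ===== PORT B =====
-- one iteration of Source B's loop body after a marker/literal is reached (stack already popped);
-- returns the updated (i, stack, mult, total), none where Source B raises
def bProcess (s : List Char) (i : Int) (stack : List (Int × Int)) (endI : Int)
    (mult total : Int) : Option (Int × List (Int × Int) × Int × Int) :=
  match PySem.List.pyGet? s i with
  | none => none
  | some c =>
    if c = '(' then
      match pyIndexRParen s i.toNat (min (i + 10) endI).toNat with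
      | none => none
      | some j =>
        match parseMarker (PySem.List.slice s (some (i + 1)) (some (j : Int))) with
        | none => none
        | some (a, b) =>
          some ((j : Int) + 1, (min ((j : Int) + 1 + a) endI, mult) :: stack, mult * b, total)
    else some (i + 1, stack, mult, total + mult)

-- one step of Source B's outer loop: either pop one finished frame (the inner while), or process s[i]
def bStep (s : List Char) (i : Int) (stack : List (Int × Int)) (mult total : Int) :
    Option (Int × List (Int × Int) × Int × Int) :=
  match stack with
  | (e, m) :: rest =>
    if e ≤ i then some (i, rest, m, total)
    else bProcess s i ((e, m) :: rest) e mult total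
  | [] => bProcess s i [] (s.length : Int) mult total

-- Source B's loop, fuel-bounded (fuel only makes it total; 2*len+2 is enough under Pre_)
def bGo : Nat → List Char → Int → List (Int × Int) → Int → Int → Int
  | 0, _, _, _, _, _ => 0
  | fuel+1, s, i, stack, mult, total =>
    if i < (s.length : Int) then
      match bStep s i stack mult total with
      | none => 0                                   -- Source B raises
      | some (i', st', m', t') => bGo fuel s i' st' m' t'
    else total

def decompress2_alt (file_str : String) : Int :=
  bGo (2 * file_str.toList.length + 2) file_str.toList 0 [] 1 0

-- ===== PRECONDITION & SPEC =====
-- first ')' in the 9 characters after a '(' at p (Python searches [p, p+10), but s[p] = '(' ≠ ')')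
def closeParen (l : List Char) (p : Nat) : Option Nat :=
  (List.range' (p + 1) 9).find? (fun j => l.getD j ' ' == ')')

-- the marker starting at p: (index of its ')', number of chars (≥ 0), number of repeats)
def markerAt (l : List Char) (p : Nat) : Option (Nat × Nat × Int) :=
  match closeParen l p with
  | none => none
  | some j =>
    match parseMarker ((l.drop (p + 1)).take (j - (p + 1))) with
    | none => none
    | some (a, b) => if 0 ≤ a then some (j, a.toNat, b) else none

-- a marker at q lying in the repeated region of the marker at p must close inside that region
def containOK (l : List Char) (p q : Nat) : Bool :=
  if l.getD p ' ' == '(' && l.getD q ' ' == '(' then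
    match markerAt l p, markerAt l q with
    | some (j, a, _), some (jq, _, _) =>
      !(decide (j + 1 ≤ q) && decide (q < j + 1 + a)) || decide (jq < j + 1 + a)
    | _, _ => true
  else true

-- Pre_ excludes exactly (a) the inputs on which A raises (a '(' that does not begin a
-- parseable two-number marker closing within 10 characters inside the region it is read in), and
-- (b) markers whose first number is negative, on which A accidentally re-scans the
-- marker text itself (and on some of which A loops forever).
def Pre_decompress2 (file_str : String) : Prop :=
  (∀ p < file_str.toList.length, file_str.toList.getD p ' ' = '(' →
      (markerAt file_str.toList p).isSome = true) ∧
  (∀ p < file_str.toList.length, ∀ q < file_str.toList.length,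
      containOK file_str.toList p q = true)

instance (file_str : String) : Decidable (Pre_decompress2 file_str) := by
  unfold Pre_decompress2; infer_instance

def pvWitness_decompress2 : String := "ab(3x2)cde"

def Spec_decompress2 (file_str : String) (out : Int) : Prop := out = decompress2_alt file_str
instance (file_str : String) (out : Int) : Decidable (Spec_decompress2 file_str out) := by
  unfold Spec_decompress2; infer_instance

-- ===== CLAIM (what is proved, stated in full; the proofs are below) =====
def Claim_equal_decompress2 : Prop := ∀ (file_str : String), Dom_decompress2 file_str → Pre_decompress2 file_str → Spec_decompress2 file_str (decompress2 file_str)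

-- ===== LEMMAS AND PROOFS =====

-- the common mathematical value: decompressed length of the region [a, E) of l, absolute indices
def Aabs (l : List Char) (a E : Nat) : Int :=
  if _h : E ≤ a then 0
  else if l.getD a ' ' ≠ '(' then 1 + Aabs l (a + 1) E
  else
    match markerAt l a with
    | none => 0
    | some (j, nc, nr) =>
      if _hj : a < j then
        nr * Aabs l (j + 1) (min (j + 1 + nc) E) + Aabs l (min (j + 1 + nc) E) E
      else 0
termination_by E - a
decreasing_by all_goals omega

-- every '(' in [d, E) starts a marker that closes before E
def Good (l : List Char) (d E : Nat) : Prop :=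
  ∀ q, d ≤ q → q < E → l.getD q ' ' = '(' →
    ∃ j a b, markerAt l q = some (j, a, b) ∧ j < E

-- the containment half of Pre_, as a Prop on the list
def Ctn (l : List Char) : Prop :=
  ∀ p < l.length, ∀ q < l.length, containOK l p q = true

theorem find?_range'_eq_some {p : Nat → Bool} {s len j : Nat}
    (h1 : s ≤ j) (h2 : j < s + len) (h3 : p j = true)
    (h4 : ∀ k, s ≤ k → k < j → p k = false) :
    (List.range' s len).find? p = some j := by
  induction len generalizing s with
  | zero => omega
  | succ n ih =>
    rw [List.range'_succ, List.find?_cons]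
    by_cases hp : p s = true
    · have : j = s := by
        by_contra hne
        exact absurd hp (by simp [h4 s (le_refl s) (by omega)])
      simp [hp, this]
    · simp only [Bool.not_eq_true] at hp
      simp only [hp]
      exact ih (by
        rcases Nat.eq_or_lt_of_le h1 with h | h
        · exact absurd h3 (by simp [← h, hp])
        · omega) (by omega) (fun k hk1 hk2 => h4 k (by omega) hk2)

theorem find?_range'_spec {p : Nat → Bool} {s len j : Nat}
    (h : (List.range' s len).find? p = some j) :
    s ≤ j ∧ j < s + len ∧ p j = true ∧ ∀ k, s ≤ k → k < j → p k = false := by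
  induction len generalizing s with
  | zero => simp [List.range'] at h
  | succ n ih =>
    rw [List.range'_succ, List.find?_cons] at h
    by_cases hp : p s = true
    · simp [hp] at h
      refine ⟨by omega, by omega, by rw [← h]; exact hp, by omega⟩
    · simp only [Bool.not_eq_true] at hp
      simp only [hp] at h
      obtain ⟨h1, h2, h3, h4⟩ := ih h
      exact ⟨by omega, by omega, h3, fun k hk1 hk2 => by
        rcases Nat.eq_or_lt_of_le hk1 with hh | hh
        · rw [← hh]; exact hp
        · exact h4 k (by omega) hk2⟩

theorem getD_rparen_lt {l : List Char} {j : Nat} (h : l.getD j ' ' = ')') : j < l.length := by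
  by_contra hc
  rw [List.getD_eq_default _ _ (by omega)] at h
  exact absurd h (by decide)

theorem markerAt_elim {l : List Char} {p : Nat} {j a : Nat} {b : Int}
    (h : markerAt l p = some (j, a, b)) :
    closeParen l p = some j ∧
      ∃ nc : Int, parseMarker ((l.drop (p + 1)).take (j - (p + 1))) = some (nc, b) ∧
        0 ≤ nc ∧ nc.toNat = a := by
  unfold markerAt at h
  cases hcp : closeParen l p with
  | none => rw [hcp] at h; exact absurd h (by simp)
  | some j' =>
    rw [hcp] at h
    dsimp only at h
    cases hpm : parseMarker ((l.drop (p + 1)).take (j' - (p + 1))) with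
    | none => rw [hpm] at h; dsimp only at h; exact absurd h (by simp)
    | some ab =>
      obtain ⟨a', b'⟩ := ab
      rw [hpm] at h
      dsimp only at h
      by_cases ha : (0 : Int) ≤ a'
      · rw [if_pos ha] at h
        injection h with h
        obtain ⟨h1, h2, h3⟩ : j' = j ∧ a'.toNat = a ∧ b' = b := by
          simpa using h
        refine ⟨by rw [h1], a', ?_, ha, h2⟩
        rw [← h1]
        exact h3 ▸ hpm
      · rw [if_neg ha] at h; exact absurd h (by simp)

theorem closeParen_spec {l : List Char} {p j : Nat} (h : closeParen l p = some j) :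
    p + 1 ≤ j ∧ j < p + 10 ∧ l.getD j ' ' = ')' ∧
      ∀ k, p + 1 ≤ k → k < j → l.getD k ' ' ≠ ')' := by
  obtain ⟨h1, h2, h3, h4⟩ := find?_range'_spec h
  refine ⟨h1, by omega, by simpa using h3, fun k hk1 hk2 => by simpa using h4 k hk1 hk2⟩

-- Aabs unfolding equations
theorem Aabs_base {l : List Char} {a E : Nat} (h : E ≤ a) : Aabs l a E = 0 := by
  rw [Aabs]; simp [h]

theorem Aabs_lit {l : List Char} {a E : Nat} (h : a < E) (hc : l.getD a ' ' ≠ '(') :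
    Aabs l a E = 1 + Aabs l (a + 1) E := by
  rw [Aabs, dif_neg (by omega : ¬ E ≤ a), if_pos hc]

theorem Aabs_marker {l : List Char} {a E j nc : Nat} {nr : Int} (h : a < E)
    (hc : l.getD a ' ' = '(') (hm : markerAt l a = some (j, nc, nr)) (hj : a < j) :
    Aabs l a E = nr * Aabs l (j + 1) (min (j + 1 + nc) E) + Aabs l (min (j + 1 + nc) E) E := by
  rw [Aabs, dif_neg (by omega : ¬ E ≤ a), if_neg (by simp only [List.getD] at hc ⊢; simp [hc]), hm]
  exact dif_pos hj

-- slice bookkeeping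
theorem sliceL_length {l : List Char} {d E : Nat} (h1 : d ≤ E) (h2 : E ≤ l.length) :
    ((l.drop d).take (E - d)).length = E - d := by
  simp; omega

theorem sliceL_getD {l : List Char} {d E r : Nat} (c : Char) (h1 : d ≤ E) (h2 : E ≤ l.length)
    (h3 : r < E - d) : ((l.drop d).take (E - d)).getD r c = l.getD (d + r) c := by
  have hr : r < l.length - d := by omega
  rw [List.getD_eq_getElem?_getD, List.getD_eq_getElem?_getD,
    List.getElem?_take_of_lt h3, List.getElem?_drop]

theorem good_mono {l : List Char} {d d' E : Nat} (h : Good l d E) (hd : d ≤ d') :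
    Good l d' E :=
  fun q h1 h2 h3 => h q (by omega) h2 h3

theorem ctn_elim {l : List Char} {p q j a jq aq : Nat} {b bq : Int} (hc : Ctn l)
    (hp : p < l.length) (hq : q < l.length)
    (hgp : l.getD p ' ' = '(') (hgq : l.getD q ' ' = '(')
    (hm1 : markerAt l p = some (j, a, b)) (hm2 : markerAt l q = some (jq, aq, bq))
    (h1 : j + 1 ≤ q) (h2 : q < j + 1 + a) : jq < j + 1 + a := by
  have h := hc p hp q hq
  unfold containOK at h
  rw [if_pos (by rw [hgp, hgq]; decide), hm1, hm2] at h
  simp only [Bool.or_eq_true, Bool.not_eq_true', Bool.and_eq_false_iff,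
    decide_eq_false_iff_not, decide_eq_true_eq] at h
  rcases h with h | h
  · omega
  · exact h

theorem ctn_good_push {l : List Char} {i E j a : Nat} {nr : Int} (hc : Ctn l)
    (hg : Good l i E) (hE : E ≤ l.length) (hiE : i < E)
    (hgi : l.getD i ' ' = '(') (hm : markerAt l i = some (j, a, nr)) :
    Good l (j + 1) (min (j + 1 + a) E) := by
  intro q h1 h2 h3
  have hij : i + 1 ≤ j := (closeParen_spec (markerAt_elim hm).1).1
  obtain ⟨jq, aq, bq, hmq, hjqE⟩ := hg q (by omega) (by omega) h3
  refine ⟨jq, aq, bq, hmq, lt_min ?_ hjqE⟩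
  exact ctn_elim hc (by omega) (by omega) hgi h3 hm hmq (by omega) (by omega)

theorem sliceL_drop {l : List Char} {d u E : Nat} (h1 : d ≤ u) (h2 : u ≤ E)
    (h3 : E ≤ l.length) :
    ((l.drop d).take (E - d)).drop (u - d) = (l.drop u).take (E - u) := by
  rw [List.drop_take, List.drop_drop]
  congr 1
  · omega
  · congr 1; omega

theorem findRParen_eq {l : List Char} {i E1 j a : Nat} {nr : Int}
    (hgi : l.getD i ' ' = '(') (hm : markerAt l i = some (j, a, nr))
    (hjE : j < E1) (hiE : i < E1) :
    pyIndexRParen l i (min (i + 10) E1) = some j := by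
  obtain ⟨hcp, _, _, _, _⟩ := markerAt_elim hm
  obtain ⟨hj1, hj2, hj3, hj4⟩ := closeParen_spec hcp
  apply find?_range'_eq_some (by omega) (by omega)
    (by show (l.getD j ' ' == ')') = true; rw [hj3]; decide)
  intro k hk1 hk2
  show (l.getD k ' ' == ')') = false
  rw [beq_eq_false_iff_ne]
  rcases Nat.eq_or_lt_of_le hk1 with h | h
  · rw [← h, hgi]; decide
  · exact hj4 k (by omega) hk2

theorem bProcess_marker {l : List Char} {i E1 j a : Nat} {nr : Int}
    (st : List (Int × Int)) (mult total : Int)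
    (hgi : l.getD i ' ' = '(') (hm : markerAt l i = some (j, a, nr))
    (hjE : j < E1) (hiE : i < E1) (hE1 : E1 ≤ l.length) :
    bProcess l (i : Int) st ((E1 : Nat) : Int) mult total =
      some (((j + 1 : Nat) : Int),
        (((min (j + 1 + a) E1 : Nat) : Int), mult) :: st, mult * nr, total) := by
  obtain ⟨hcp, nc, hpm, hnc0, hnca⟩ := markerAt_elim hm
  have hin : i < l.length := by omega
  have hnc : nc = (a : Int) := by omega
  unfold bProcess
  rw [show PySem.List.pyGet? l (i : Int) = some l[i] by
    rw [PySem.List.pyGet?_natCast, List.getElem?_eq_getElem hin]]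
  dsimp only
  rw [if_pos (by rw [← List.getD_eq_getElem l ' ' hin]; exact hgi)]
  rw [show (min ((i : Int) + 10) ((E1 : Nat) : Int)).toNat = min (i + 10) E1 by omega]
  rw [show ((i : Int)).toNat = i by omega]
  rw [findRParen_eq hgi hm hjE hiE]
  dsimp only
  rw [show ((i : Int) + 1) = ((i + 1 : Nat) : Int) by omega]
  rw [PySem.List.slice_natCast]
  rw [show j - (i + 1) = j - (i + 1) from rfl] at hpm
  rw [hpm]
  dsimp only
  rw [show min ((j : Nat) + 1 + nc) ((E1 : Nat) : Int) = ((min (j + 1 + a) E1 : Nat) : Int) by omega]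
  rw [show ((j : Nat) : Int) + 1 = ((j + 1 : Nat) : Int) by omega]

theorem bProcess_lit {l : List Char} {i E1 : Nat}
    (st : List (Int × Int)) (mult total : Int)
    (hgi : l.getD i ' ' ≠ '(') (hin : i < l.length) :
    bProcess l (i : Int) st ((E1 : Nat) : Int) mult total =
      some (((i + 1 : Nat) : Int), st, mult, total + mult) := by
  unfold bProcess
  rw [show PySem.List.pyGet? l (i : Int) = some l[i] by
    rw [PySem.List.pyGet?_natCast, List.getElem?_eq_getElem hin]]
  dsimp only
  rw [if_neg (by rw [← List.getD_eq_getElem l ' ' hin]; exact hgi)]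
  rw [show ((i : Int) + 1) = ((i + 1 : Nat) : Int) by omega]

theorem findRParen_slice_eq {l : List Char} {d E i j a : Nat} {nr : Int}
    (hdi : d ≤ i) (hiE : i < E) (hEn : E ≤ l.length)
    (hgi : l.getD i ' ' = '(') (hm : markerAt l i = some (j, a, nr)) (hjE : j < E) :
    pyIndexRParen ((l.drop d).take (E - d)) (i - d) (min ((i - d) + 10) (E - d)) =
      some (j - d) := by
  obtain ⟨hcp, _, _, _, _⟩ := markerAt_elim hm
  obtain ⟨hj1, hj2, hj3, hj4⟩ := closeParen_spec hcp
  apply find?_range'_eq_some (by omega) (by omega)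
  · show (((l.drop d).take (E - d)).getD (j - d) ' ' == ')') = true
    rw [sliceL_getD ' ' (by omega) hEn (by omega), show d + (j - d) = j by omega, hj3]
    decide
  · intro k hk1 hk2
    show (((l.drop d).take (E - d)).getD k ' ' == ')') = false
    rw [beq_eq_false_iff_ne]
    rw [sliceL_getD ' ' (by omega) hEn (by omega)]
    rcases Nat.eq_or_lt_of_le hk1 with h | h
    · rw [show d + k = i by omega, hgi]; decide
    · exact hj4 (d + k) (by omega) (by omega)

-- main A-side lemma: A running on the slice [d, E) of l from relative index i - d computes Aabs
theorem aGo_eq_Aabs (l : List Char) : ∀ fuel d E i acc, Ctn l → d ≤ i → d ≤ E → E ≤ l.length →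
    Good l i E → fuel ≥ 2 * (E - min i E) + 1 →
    aGo fuel ((l.drop d).take (E - d)) ((i - d : Nat) : Int) acc = acc + Aabs l i E := by
  intro fuel
  induction fuel with
  | zero => intro d E i acc _ _ _ _ _ hf; omega
  | succ f ih =>
    intro d E i acc hc hdi hdE hEn hg hf
    have hlen : ((l.drop d).take (E - d)).length = E - d := sliceL_length hdE hEn
    simp only [aGo]
    rw [hlen]
    by_cases hiE : E ≤ i
    · rcases Nat.eq_or_lt_of_le hiE with heq | hlt
      · rw [if_neg (by omega), if_pos (by omega), Aabs_base hiE, add_zero]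
      · rw [if_pos (by omega), Aabs_base hiE, add_zero]
    · have hiE' : i < E := by omega
      rw [if_neg (by omega), if_neg (by omega)]
      have hidx : i - d < ((l.drop d).take (E - d)).length := by omega
      have hgetd : ((l.drop d).take (E - d)).getD (i - d) ' ' = l.getD i ' ' := by
        rw [sliceL_getD ' ' hdE hEn (by omega)]; congr 1; omega
      rw [show PySem.List.pyGet? ((l.drop d).take (E - d)) ((i - d : Nat) : Int) =
          some (((l.drop d).take (E - d)).getD (i - d) ' ') by
        rw [PySem.List.pyGet?_natCast, List.getElem?_eq_getElem hidx,
          List.getD_eq_getElem _ ' ' hidx]]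
      dsimp only
      by_cases hgi : l.getD i ' ' = '('
      · rw [if_neg (by rw [hgetd, hgi]; simp)]
        obtain ⟨j, a, nr, hm, hjE⟩ := hg i (le_refl i) hiE' hgi
        obtain ⟨hcp, nc, hpm, hnc0, hnca⟩ := markerAt_elim hm
        obtain ⟨hj1, hj2, hj3, hj4⟩ := closeParen_spec hcp
        have hnca' : nc = (a : Int) := by omega
        rw [show ((i - d : Nat) : Int).toNat = i - d by omega]
        rw [findRParen_slice_eq hdi hiE' hEn hgi hm hjE]
        dsimp only
        rw [show ((i - d : Nat) : Int) + 1 = ((i - d + 1 : Nat) : Int) by omega,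
          PySem.List.slice_natCast,
          show i - d + 1 = (i + 1) - d by omega,
          sliceL_drop (by omega) (by omega) hEn, List.take_take,
          show min ((j - d) - ((i + 1) - d)) (E - (i + 1)) = j - (i + 1) by omega,
          hpm]
        dsimp only
        rw [hnca',
          show ((j - d : Nat) : Int) + 1 = ((j - d + 1 : Nat) : Int) by omega,
          show ((j - d + 1 : Nat) : Int) + (a : Int) = ((j - d + 1 + a : Nat) : Int) by omega,
          PySem.List.slice_natCast,
          show j - d + 1 + a - (j - d + 1) = a by omega,
          show j - d + 1 = (j + 1) - d by omega,
          sliceL_drop (by omega) (by omega) hEn, List.take_take,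
          show min a (E - (j + 1)) = min (j + 1 + a) E - (j + 1) by omega]
        have Hsub := ih (j + 1) (min (j + 1 + a) E) (j + 1) 0 hc (le_refl _) (by omega)
          (by omega) (ctn_good_push hc hg hEn hiE' hgi hm) (by omega)
        simp only [Nat.sub_self, Nat.cast_zero, zero_add] at Hsub
        rw [Hsub]
        rw [show (((j + 1) - d + a : Nat) : Int) = (((j + 1 + a) - d : Nat) : Int) by omega]
        rw [ih d E (j + 1 + a) (acc + Aabs l (j + 1) (min (j + 1 + a) E) * nr) hc
          (by omega) hdE hEn (good_mono hg (by omega)) (by omega)]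
        have hcont : Aabs l (j + 1 + a) E = Aabs l (min (j + 1 + a) E) E := by
          rcases le_total (j + 1 + a) E with h | h
          · rw [min_eq_left h]
          · rw [min_eq_right h, Aabs_base (le_refl E), Aabs_base h]
        rw [hcont, Aabs_marker hiE' hgi hm (by omega)]
        ring
      · rw [if_pos (by rw [hgetd]; exact hgi)]
        rw [show ((i - d : Nat) : Int) + 1 = (((i + 1) - d : Nat) : Int) by omega]
        rw [ih d E (i + 1) (acc + 1) hc (by omega) hdE hEn
          (good_mono hg (by omega)) (by omega)]
        rw [Aabs_lit hiE' hgi]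
        ring

-- B-side: value of the pending frames
def restV (l : List Char) : Nat → Int → List (Nat × Int) → Int
  | i, mult, [] => mult * Aabs l i l.length
  | i, mult, (E, m) :: fs => mult * Aabs l i E + restV l E m fs

-- B-side stack invariant
def ChainOK (l : List Char) : Nat → List (Nat × Int) → Prop
  | i, [] => i ≤ l.length ∧ Good l i l.length
  | i, (E, m) :: fs => i ≤ E ∧ Good l i E ∧ ChainOK l E fs

theorem chainOK_le {l : List Char} : ∀ {i fs}, ChainOK l i fs → i ≤ l.length := by
  intro i fs
  induction fs generalizing i with
  | nil => exact fun h => h.1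
  | cons em fs ih =>
    obtain ⟨E, m⟩ := em
    exact fun h => le_trans h.1 (ih h.2.2)

theorem restV_zero {l : List Char} : ∀ {i fs mult}, ChainOK l i fs → l.length ≤ i →
    restV l i mult fs = 0 := by
  intro i fs
  induction fs generalizing i with
  | nil => intro mult h hn; simp [restV, Aabs_base hn]
  | cons em fs ih =>
    obtain ⟨E, m⟩ := em
    intro mult h hn
    have hE : E ≤ l.length := chainOK_le h.2.2
    have hiE : i ≤ E := h.1
    simp [restV, Aabs_base (show E ≤ i by omega), ih h.2.2 (by omega)]

-- main B-side lemma
theorem bGo_eq_restV (l : List Char) : ∀ fuel i fs mult total, Ctn l → ChainOK l i fs →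
    fuel ≥ 2 * (l.length - i) + fs.length + 1 →
    bGo fuel l (i : Int) (fs.map (fun em => ((em.1 : Int), em.2))) mult total =
      total + restV l i mult fs := by
  intro fuel
  induction fuel with
  | zero => intro i fs mult total _ _ hf; omega
  | succ f ih =>
    intro i fs mult total hc hch hf
    by_cases hin : i < l.length
    case neg =>
      simp only [bGo]
      rw [if_neg (by omega), restV_zero hch (by omega), add_zero]
    case pos =>
      simp only [bGo]
      rw [if_pos (by omega)]
      cases fs with
      | nil =>
        have hgood : Good l i l.length := hch.2
        simp only [List.map_nil, bStep]
        by_cases hgi : l.getD i ' ' = '('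
        · obtain ⟨j, a, nr, hm, hjE⟩ := hgood i (le_refl i) hin hgi
          have hij : i + 1 ≤ j := (closeParen_spec (markerAt_elim hm).1).1
          rw [bProcess_marker [] mult total hgi hm hjE hin (le_refl _)]
          dsimp only
          have H := ih (j + 1) [(min (j + 1 + a) l.length, mult)] (mult * nr) total hc
            ⟨by omega, ctn_good_push hc hgood (le_refl _) hin hgi hm,
              by omega, good_mono hgood (by omega)⟩
            (by simp; omega)
          simp only [List.map_cons, List.map_nil] at H
          rw [H]
          rw [show restV l i mult [] = mult * Aabs l i l.length from rfl]
          rw [Aabs_marker hin hgi hm (by omega)]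
          rw [show restV l (j + 1) (mult * nr) [(min (j + 1 + a) l.length, mult)] =
            mult * nr * Aabs l (j + 1) (min (j + 1 + a) l.length) +
              mult * Aabs l (min (j + 1 + a) l.length) l.length from rfl]
          ring
        · rw [bProcess_lit [] mult total hgi hin]
          dsimp only
          have H := ih (i + 1) [] mult (total + mult) hc
            ⟨by omega, good_mono hgood (by omega)⟩ (by simp; omega)
          simp only [List.map_nil] at H
          rw [H]
          rw [show restV l i mult [] = mult * Aabs l i l.length from rfl,
            show restV l (i + 1) mult [] = mult * Aabs l (i + 1) l.length from rfl,
            Aabs_lit hin hgi]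
          ring
      | cons em fs' =>
        obtain ⟨E, m⟩ := em
        obtain ⟨hiE, hgood, hch'⟩ := hch
        have hEn : E ≤ l.length := chainOK_le hch'
        simp only [List.map_cons, bStep]
        by_cases hpop : E ≤ i
        · have hEi : E = i := by omega
          rw [if_pos (by omega)]
          dsimp only
          rw [ih i fs' m total hc (by rw [← hEi]; exact hch') (by simp at hf ⊢; omega)]
          rw [show restV l i mult ((E, m) :: fs') =
            mult * Aabs l i E + restV l E m fs' from rfl, hEi, Aabs_base (le_refl i)]
          ring
        · rw [if_neg (by omega)]
          have hiE' : i < E := by omega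
          by_cases hgi : l.getD i ' ' = '('
          · obtain ⟨j, a, nr, hm, hjE⟩ := hgood i (le_refl i) hiE' hgi
            have hij : i + 1 ≤ j := (closeParen_spec (markerAt_elim hm).1).1
            rw [bProcess_marker ((((E : Nat) : Int), m) ::
              fs'.map (fun em => ((em.1 : Int), em.2))) mult total hgi hm hjE hiE' hEn]
            dsimp only
            have H := ih (j + 1) ((min (j + 1 + a) E, mult) :: (E, m) :: fs') (mult * nr)
              total hc
              ⟨by omega, ctn_good_push hc hgood hEn hiE' hgi hm,
                by omega, good_mono hgood (by omega), hch'⟩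
              (by simp at hf ⊢; omega)
            simp only [List.map_cons] at H
            rw [H]
            rw [show restV l i mult ((E, m) :: fs') =
              mult * Aabs l i E + restV l E m fs' from rfl]
            rw [Aabs_marker hiE' hgi hm (by omega)]
            rw [show restV l (j + 1) (mult * nr) ((min (j + 1 + a) E, mult) :: (E, m) :: fs') =
              mult * nr * Aabs l (j + 1) (min (j + 1 + a) E) +
                (mult * Aabs l (min (j + 1 + a) E) E + restV l E m fs') from rfl]
            ring
          · rw [bProcess_lit _ mult total hgi hin]
            dsimp only
            have H := ih (i + 1) ((E, m) :: fs') mult (total + mult) hc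
              ⟨by omega, good_mono hgood (by omega), hch'⟩ (by simp at hf ⊢; omega)
            simp only [List.map_cons] at H
            rw [H]
            rw [show restV l i mult ((E, m) :: fs') =
              mult * Aabs l i E + restV l E m fs' from rfl,
              show restV l (i + 1) mult ((E, m) :: fs') =
                mult * Aabs l (i + 1) E + restV l E m fs' from rfl,
              Aabs_lit hiE' hgi]
            ring

-- ===== VERDICT (by name: the statement is the Claim_ definition above) =====
theorem decompress2_spec : Claim_equal_decompress2 := by
  unfold Claim_equal_decompress2
  intro fs _ hpre
  unfold Spec_decompress2 decompress2 decompress2_alt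
  obtain ⟨hmk, hcn⟩ := hpre
  have hc : Ctn fs.toList := hcn
  have hgood : Good fs.toList 0 fs.toList.length := by
    intro q _ hq hgq
    obtain ⟨jab, hj⟩ := Option.isSome_iff_exists.mp (hmk q hq hgq)
    obtain ⟨j, a, b⟩ := jab
    exact ⟨j, a, b, hj, getD_rparen_lt (closeParen_spec (markerAt_elim hj).1).2.2.1⟩
  have hA := aGo_eq_Aabs fs.toList (2 * fs.toList.length + 2) 0 fs.toList.length 0 0 hc
    (le_refl 0) (Nat.zero_le _) (le_refl _) hgood (by omega)
  have hB := bGo_eq_restV fs.toList (2 * fs.toList.length + 2) 0 [] 1 0 hc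
    ⟨Nat.zero_le _, hgood⟩ (by simp)
  simp only [List.drop_zero, Nat.sub_zero, List.take_length, Nat.cast_zero, List.map_nil,
    zero_add] at hA hB
  rw [hA, hB, show restV fs.toList 0 1 [] = 1 * Aabs fs.toList 0 fs.toList.length from rfl]
  ring
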